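-- pv_equiv track=rewrite | github.com/dgymjol/TR-DETR | aug_cut.py | find_zeros_groups
-- ===== SOURCE A (Python) =====
-- def find_zeros_groups(arr):
--     groups = []
--     start_idx = None
--
--     l = len(arr)
--     for i in range(l):
--         if arr[i] == 0 and start_idx is None:
--             # 0이 처음 시작되는 인덱스 기록
--             start_idx = i
--         elif arr[i] == 1 and start_idx is not None:
--             # 0의 그룹이 끝나는 인덱스 기록
--             groups.append([start_idx * 2, i * 2])
--             start_idx = None
--
--     # 마지막 그룹이 배열 끝까지 이어지는 경우 처리
--     if start_idx is not None:
--         groups.append([start_idx * 2, len(arr) * 2])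
--
--     return groups
-- ===== SOURCE B (Python) =====
-- def find_zeros_groups(arr):
--     n = len(arr)
--
--     def first_at(val, i):
--         # index of the first occurrence of val at or after position i, or n if none
--         while i < n and arr[i] != val:
--             i += 1
--         return i
--
--     groups = []
--     i = 0
--     while True:
--         z = first_at(0, i)          # start of the next zero run
--         if z >= n:
--             return groups
--         e = first_at(1, z + 1)      # first 1 strictly after the start
--         if e >= n:
--             groups.append([z * 2, n * 2])
--             return groups
--         groups.append([z * 2, e * 2])
--         i = e + 1
-- ===== Notes on version B (the rewrite author's own statement) =====
-- stated objective: alternative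
-- what changed: Replaces A's single stateful flag-carrying scan by a cursor-driven loop with a first_at helper that repeatedly locates the start of the next zero run and the first 1 strictly after it, emitting one group per iteration.
import Mathlib
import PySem

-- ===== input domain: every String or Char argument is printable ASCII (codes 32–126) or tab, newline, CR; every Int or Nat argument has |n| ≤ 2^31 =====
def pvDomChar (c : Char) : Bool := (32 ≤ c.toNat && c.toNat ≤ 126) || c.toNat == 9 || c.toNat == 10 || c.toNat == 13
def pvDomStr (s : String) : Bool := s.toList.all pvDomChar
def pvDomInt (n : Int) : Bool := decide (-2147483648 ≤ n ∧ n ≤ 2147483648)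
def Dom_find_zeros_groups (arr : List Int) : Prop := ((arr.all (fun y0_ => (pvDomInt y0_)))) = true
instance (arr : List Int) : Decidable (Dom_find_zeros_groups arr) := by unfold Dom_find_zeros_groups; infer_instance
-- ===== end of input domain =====

-- B replaces A's single stateful flag-scan by a cursor loop that repeatedly finds the
-- start of the next zero run and the first 1 after it (objective: alternative decomposition, same cost).

-- ===== PORT A =====
-- stateful scan: state = (groups, start_idx); final append if start_idx is still set
def find_zeros_groups (arr : List Int) : List (List Int) :=
  let l : Int := arr.length
  let st := (PySem.List.pyRange 0 l 1).foldl
    (fun (p : List (List Int) × Option Int) i =>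
      match p with
      | (groups, none) =>
          if (PySem.List.pyGet? arr i).getD 0 = 0 then (groups, some i) else (groups, none)
      | (groups, some s) =>
          if (PySem.List.pyGet? arr i).getD 0 = 0 then (groups, some s)
          else if (PySem.List.pyGet? arr i).getD 0 = 1 then (groups ++ [[s * 2, i * 2]], none)
          else (groups, some s))
    ([], none)
  match st with
  | (groups, none) => groups
  | (groups, some s) => groups ++ [[s * 2, l * 2]]

-- ===== PORT B =====
-- first_at: index of the first occurrence of val at or after i, or len(arr) if none
def pvFirstAt (arr : List Int) (val i : Int) : Int :=
  if i < (arr.length : Int) then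
    (if (PySem.List.pyGet? arr i).getD 0 = val then i else pvFirstAt arr val (i + 1))
  else i
termination_by ((arr.length : Int) - i).toNat
decreasing_by omega

theorem pvFirstAt_ge (arr : List Int) (val i : Int) : i ≤ pvFirstAt arr val i := by
  fun_induction pvFirstAt arr val i with
  | case1 => omega
  | case2 _ _ _ ih => omega
  | case3 => omega

-- the while-True cursor loop of B, accumulating groups
def pvAltGo (arr : List Int) (groups : List (List Int)) (i : Int) : List (List Int) :=
  let n : Int := arr.length
  let z := pvFirstAt arr 0 i
  if n ≤ z then groups
  else
    let e := pvFirstAt arr 1 (z + 1)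
    if n ≤ e then groups ++ [[z * 2, n * 2]]
    else pvAltGo arr (groups ++ [[z * 2, e * 2]]) (e + 1)
termination_by ((arr.length : Int) - i).toNat
decreasing_by
  have h1 := pvFirstAt_ge arr 0 i
  have h2 := pvFirstAt_ge arr 1 (pvFirstAt arr 0 i + 1)
  omega

def find_zeros_groups_alt (arr : List Int) : List (List Int) :=
  pvAltGo arr [] 0

-- ===== PRECONDITION & SPEC =====
def Spec_find_zeros_groups (arr : List Int) (out : List (List Int)) : Prop := out = find_zeros_groups_alt arr
instance (arr : List Int) (out : List (List Int)) : Decidable (Spec_find_zeros_groups arr out) := by unfold Spec_find_zeros_groups; infer_instance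

-- ===== CLAIM (what is proved, stated in full; the proofs are below) =====
def Claim_equal_find_zeros_groups : Prop := ∀ (arr : List Int), Dom_find_zeros_groups arr → Spec_find_zeros_groups arr (find_zeros_groups arr)

-- ===== LEMMAS AND PROOFS =====

-- A's step function, named for the proofs
def pvStepA (arr : List Int) (p : List (List Int) × Option Int) (i : Int) : List (List Int) × Option Int :=
  match p with
  | (groups, none) =>
      if (PySem.List.pyGet? arr i).getD 0 = 0 then (groups, some i) else (groups, none)
  | (groups, some s) =>
      if (PySem.List.pyGet? arr i).getD 0 = 0 then (groups, some s)
      else if (PySem.List.pyGet? arr i).getD 0 = 1 then (groups ++ [[s * 2, i * 2]], none)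
      else (groups, some s)

-- A's loop tail from index i, followed by the final append
def pvFinishA (arr : List Int) (i : Int) (p : List (List Int) × Option Int) : List (List Int) :=
  match (PySem.List.pyRange i (arr.length : Int) 1).foldl (pvStepA arr) p with
  | (groups, none) => groups
  | (groups, some s) => groups ++ [[s * 2, (arr.length : Int) * 2]]

-- what B computes from state (g, st) at cursor i
def pvContB (arr : List Int) (g : List (List Int)) (st : Option Int) (i : Int) : List (List Int) :=
  match st with
  | none => pvAltGo arr g i
  | some s =>
      let n : Int := arr.length
      let e := pvFirstAt arr 1 i
      if n ≤ e then g ++ [[s * 2, n * 2]]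
      else pvAltGo arr (g ++ [[s * 2, e * 2]]) (e + 1)

theorem pvFirstAt_stop (arr : List Int) (val i : Int) (h : ¬ i < (arr.length : Int)) :
    pvFirstAt arr val i = i := by
  rw [pvFirstAt]; simp [h]

theorem pvFirstAt_hit (arr : List Int) (val i : Int) (h : i < (arr.length : Int))
    (hv : (PySem.List.pyGet? arr i).getD 0 = val) : pvFirstAt arr val i = i := by
  rw [pvFirstAt]; simp [h, hv]

theorem pvFirstAt_miss (arr : List Int) (val i : Int) (h : i < (arr.length : Int))
    (hv : ¬ (PySem.List.pyGet? arr i).getD 0 = val) :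
    pvFirstAt arr val i = pvFirstAt arr val (i + 1) := by
  rw [pvFirstAt]; simp [h, hv]

theorem pv_base (arr : List Int) (g : List (List Int)) (st : Option Int) :
    pvFinishA arr (arr.length : Int) (g, st) = pvContB arr g st (arr.length : Int) := by
  have hstop0 := pvFirstAt_stop arr 0 (arr.length : Int) (by omega)
  have hstop1 := pvFirstAt_stop arr 1 (arr.length : Int) (by omega)
  unfold pvFinishA
  rw [PySem.List.pyRange_one_eq_nil le_rfl]
  cases st with
  | none =>
      rw [pvContB, pvAltGo]
      simp [hstop0]
  | some s =>
      rw [pvContB]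
      simp [hstop1]

theorem pv_main (arr : List Int) : ∀ (k : Nat) (i : Int), 0 ≤ i → i ≤ (arr.length : Int) →
    ((arr.length : Int) - i).toNat ≤ k →
    ∀ (g : List (List Int)) (st : Option Int),
    pvFinishA arr i (g, st) = pvContB arr g st i := by
  intro k
  induction k with
  | zero =>
      intro i h0 hn hk g st
      have : i = (arr.length : Int) := by omega
      subst this
      exact pv_base arr g st
  | succ k ih =>
      intro i h0 hn hk g st
      by_cases hlt : i < (arr.length : Int)
      · have hstep : pvFinishA arr i (g, st) = pvFinishA arr (i + 1) (pvStepA arr (g, st) i) := by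
          unfold pvFinishA
          rw [PySem.List.pyRange_one_cons hlt]
          rfl
        have ih' := fun g' st' => ih (i + 1) (by omega) (by omega) (by omega) g' st'
        rw [hstep]
        cases st with
        | none =>
            by_cases h₀ : (PySem.List.pyGet? arr i).getD 0 = 0
            · -- a zero run starts at i
              rw [show pvStepA arr (g, none) i = (g, some i) by simp [pvStepA, h₀]]
              rw [ih' g (some i)]
              simp only [pvContB]
              conv_rhs => rw [pvAltGo, pvFirstAt_hit arr 0 i hlt h₀]
              rw [if_neg (by omega : ¬ (arr.length : Int) ≤ i)]
            · -- not a zero: state stays none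
              rw [show pvStepA arr (g, none) i = (g, none) by simp [pvStepA, h₀]]
              rw [ih' g none]
              rw [pvContB, pvContB]
              have hz := pvFirstAt_miss arr 0 i hlt h₀
              conv_lhs => rw [pvAltGo]
              conv_rhs => rw [pvAltGo]
              rw [hz]
        | some s =>
            by_cases h₀ : (PySem.List.pyGet? arr i).getD 0 = 0
            · -- a 0 is not a 1: keep scanning for the closing 1
              rw [show pvStepA arr (g, some s) i = (g, some s) by simp [pvStepA, h₀]]
              rw [ih' g (some s)]
              have he : pvFirstAt arr 1 i = pvFirstAt arr 1 (i + 1) :=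
                pvFirstAt_miss arr 1 i hlt (by rw [h₀]; norm_num)
              rw [pvContB, pvContB, he]
            · by_cases h₁ : (PySem.List.pyGet? arr i).getD 0 = 1
              · -- the closing 1 is at i
                rw [show pvStepA arr (g, some s) i = (g ++ [[s * 2, i * 2]], none) by
                  simp [pvStepA, h₁]]
                rw [ih' (g ++ [[s * 2, i * 2]]) none]
                rw [pvContB, pvContB]
                rw [pvFirstAt_hit arr 1 i hlt h₁]
                simp only [if_neg (by omega : ¬ (arr.length : Int) ≤ i)]
              · -- neither 0 nor 1: inert in both programs
                rw [show pvStepA arr (g, some s) i = (g, some s) by simp [pvStepA, h₀, h₁]]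
                rw [ih' g (some s)]
                have he : pvFirstAt arr 1 i = pvFirstAt arr 1 (i + 1) :=
                  pvFirstAt_miss arr 1 i hlt h₁
                rw [pvContB, pvContB, he]
      · have : i = (arr.length : Int) := by omega
        subst this
        exact pv_base arr g st

theorem find_zeros_groups_spec' (arr : List Int) :
    find_zeros_groups arr = find_zeros_groups_alt arr := by
  have h := pv_main arr arr.length 0 le_rfl (Int.natCast_nonneg _) (by omega) [] none
  simpa [find_zeros_groups, pvFinishA, pvStepA, pvContB, find_zeros_groups_alt] using h

-- ===== VERDICT (by name: the statement is the Claim_ definition above) =====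
theorem find_zeros_groups_spec : Claim_equal_find_zeros_groups := by
  intro arr _
  unfold Spec_find_zeros_groups
  exact find_zeros_groups_spec' arr
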